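-- pv_equiv track=rewrite | github.com/mirimSunwoo/sunwoo-coding-test-study | COSPro/모의고사2회/practice2.py | solution
-- ===== SOURCE A (Python) =====
-- def solution(shoes_size):
--     size = ["7","7.5","8","8.5","9","9.5"]
--     count_size = [0,0,0,0,0,0]
--     for index,x in enumerate(size):
--         for y in shoes_size:
--             if x == y:
--                 count_size[index] += 1
--     return count_size
-- ===== SOURCE B (Python) =====
-- def solution(shoes_size):
--     sizes = ["7", "7.5", "8", "8.5", "9", "9.5"]
--     # sort, then run-length encode the sorted list into {value: run length}
--     runs = {}
--     head = None
--     k = 0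
--     for y in sorted(shoes_size):
--         if head is not None and y == head:
--             k += 1
--         else:
--             if head is not None:
--                 runs[head] = k
--             head = y
--             k = 1
--     if head is not None:
--         runs[head] = k
--     return [runs.get(s, 0) for s in sizes]
-- ===== Notes on version B (the rewrite author's own statement) =====
-- stated objective: alternative
-- what changed: Replaces A's six full scans of shoes_size (one per fixed size) with sort-then-run-length-encode: the list is sorted, consecutive runs of equal values are collapsed in one pass into a run-length table, and the six answers are read off that table.
import Mathlib
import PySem

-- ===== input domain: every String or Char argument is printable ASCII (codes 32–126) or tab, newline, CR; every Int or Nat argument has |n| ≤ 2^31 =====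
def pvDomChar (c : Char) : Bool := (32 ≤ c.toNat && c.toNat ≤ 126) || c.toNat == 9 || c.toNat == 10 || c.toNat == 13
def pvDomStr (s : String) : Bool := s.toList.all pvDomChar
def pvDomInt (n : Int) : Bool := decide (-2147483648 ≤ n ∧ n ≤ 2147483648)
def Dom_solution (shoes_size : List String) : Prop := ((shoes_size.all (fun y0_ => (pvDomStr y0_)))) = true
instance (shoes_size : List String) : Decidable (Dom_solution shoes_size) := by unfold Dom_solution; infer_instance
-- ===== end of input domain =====

-- B replaces A's six full scans (one per fixed size) with sort + recursive run-length
-- encoding into a table, read off once per fixed size (alternative algorithm, similar cost).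

-- ===== PORT A =====
-- for index, x in enumerate(size): for y in shoes_size: if x == y: count_size[index] += 1
def solution (shoes_size : List String) : List Int :=
  let size : List String := ["7", "7.5", "8", "8.5", "9", "9.5"]
  let count_size : List Int := [0, 0, 0, 0, 0, 0]
  (PySem.List.enumerate size).foldl
    (fun cs ix =>
      shoes_size.foldl
        (fun cs y =>
          if ix.2 == y then
            PySem.List.pySetD cs ix.1 (PySem.List.pyGetD cs ix.1 0 + 1)
          else cs)
        cs)
    count_size

-- ===== PORT B =====
-- for y in sorted(shoes_size): if head is not None and y == head: k += 1
--                              else: (flush head into runs); head = y; k = 1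
-- state = (runs, head : Option, k); after the loop, flush head into runs.
def pvStep (st : PySem.Dict String Int × Option String × Int) (y : String) :
    PySem.Dict String Int × Option String × Int :=
  match st with
  | (runs, some h, k) =>
      if y == h then (runs, some h, k + 1)
      else (runs.insert h k, some y, 1)
  | (runs, none, _) => (runs, some y, 1)

def pvFlush (st : PySem.Dict String Int × Option String × Int) : PySem.Dict String Int :=
  match st with
  | (runs, some h, k) => runs.insert h k
  | (runs, none, _) => runs

-- r = <run-length table of sorted(shoes_size)>; return [r.get(s, 0) for s in sizes]
def solution_alt (shoes_size : List String) : List Int :=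
  let r := pvFlush ((PySem.List.sorted shoes_size (fun x => x) false).foldl pvStep
    (PySem.Dict.empty, none, 0))
  (["7", "7.5", "8", "8.5", "9", "9.5"] : List String).map (fun s => r.getD s 0)

-- ===== PRECONDITION & SPEC =====
def Spec_solution (shoes_size : List String) (out : List Int) : Prop := out = solution_alt shoes_size
instance (shoes_size : List String) (out : List Int) : Decidable (Spec_solution shoes_size out) := by unfold Spec_solution; infer_instance

-- ===== CLAIM =====
def Claim_equal_solution : Prop := ∀ (shoes_size : List String), Dom_solution shoes_size → Spec_solution shoes_size (solution shoes_size)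

-- ===== LEMMAS AND PROOFS =====

theorem pySetD_of_inrange (cs : List Int) (i : Int) (v : Int) (h0 : 0 ≤ i)
    (h1 : i < cs.length) : PySem.List.pySetD cs i v = cs.set i.toNat v := by
  simp only [PySem.List.pySetD, PySem.List.pySet?, PySem.List.pyIdx?]
  rw [if_pos h0, if_pos h1]
  rfl

theorem pyGetD_of_inrange (cs : List Int) (i : Int) (h0 : 0 ≤ i)
    (h1 : i < cs.length) : PySem.List.pyGetD cs i 0 = cs.getD i.toNat 0 := by
  simp only [PySem.List.pyGetD, PySem.List.pyGet?, PySem.List.pyIdx?]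
  rw [if_pos h0, if_pos h1]
  rfl

theorem inner_fold_len (x : String) (l : List String) (cs : List Int) (i : Int) :
    (l.foldl
      (fun cs y =>
        if x == y then PySem.List.pySetD cs i (PySem.List.pyGetD cs i 0 + 1) else cs)
      cs).length = cs.length := by
  induction l generalizing cs with
  | nil => rfl
  | cons y t ih =>
      rw [List.foldl_cons]
      by_cases hxy : x == y
      · rw [if_pos hxy, ih]
        simp [PySem.List.pySetD, PySem.List.pySet?]
        cases PySem.List.pyIdx? cs.length i <;> simp
      · rw [if_neg hxy, ih]

theorem inner_loop (x : String) (l : List String) (cs : List Int) (i : Int)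
    (h0 : 0 ≤ i) (h1 : i < cs.length) :
    l.foldl
      (fun cs y =>
        if x == y then PySem.List.pySetD cs i (PySem.List.pyGetD cs i 0 + 1) else cs)
      cs
    = cs.set i.toNat (cs.getD i.toNat 0 + l.count x) := by
  induction l generalizing cs with
  | nil =>
      have hlt : i.toNat < cs.length := by omega
      rw [List.foldl_nil, List.count_nil]
      simp only [Nat.cast_zero, add_zero]
      rw [List.getD_eq_getElem _ _ hlt]
      exact (List.set_getElem_self hlt).symm
  | cons y t ih =>
      simp only [List.foldl_cons]
      by_cases hxy : x == y
      · rw [if_pos hxy, pySetD_of_inrange cs i _ h0 h1, pyGetD_of_inrange cs i h0 h1,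
          ih (cs.set i.toNat (cs.getD i.toNat 0 + 1)) (by simp only [List.length_set]; exact h1)]
        have hlt : i.toNat < cs.length := by omega
        have hlt2 : i.toNat < (cs.set i.toNat (cs.getD i.toNat 0 + 1)).length := by
          rw [List.length_set]; exact hlt
        have hget : (cs.set i.toNat (cs.getD i.toNat 0 + 1)).getD i.toNat 0
            = cs.getD i.toNat 0 + 1 := by
          rw [List.getD_eq_getElem _ _ hlt2, List.getElem_set_self hlt2,
            List.getD_eq_getElem _ _ hlt]
        rw [hget, List.set_set]
        have hc : (y :: t).count x = t.count x + 1 := by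
          simp [eq_of_beq hxy]
        rw [hc]; congr 1; push_cast; ring
      · rw [if_neg hxy, ih cs h1]
        have hc : (y :: t).count x = t.count x := by
          simp [List.count_cons]
          intro h; exact absurd (by simp [h]) hxy
        rw [hc]

theorem solution_eq_counts (shoes_size : List String) :
    solution shoes_size =
      [ (List.count "7" shoes_size : Int), (List.count "7.5" shoes_size : Int),
        (List.count "8" shoes_size : Int), (List.count "8.5" shoes_size : Int),
        (List.count "9" shoes_size : Int), (List.count "9.5" shoes_size : Int) ] := by
  unfold solution
  simp only [PySem.List.enumerate, List.foldl_cons, List.foldl_nil]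
  rw [inner_loop _ _ _ _ (by norm_num) (by rw [inner_fold_len (x := "9") (i := 0 + 1 + 1 + 1 + 1), inner_fold_len (x := "8.5") (i := 0 + 1 + 1 + 1), inner_fold_len (x := "8") (i := 0 + 1 + 1), inner_fold_len (x := "7.5") (i := 0 + 1), inner_fold_len (x := "7") (i := 0)]; norm_num)]
  rw [inner_loop _ _ _ _ (by norm_num) (by rw [inner_fold_len (x := "8.5") (i := 0 + 1 + 1 + 1), inner_fold_len (x := "8") (i := 0 + 1 + 1), inner_fold_len (x := "7.5") (i := 0 + 1), inner_fold_len (x := "7") (i := 0)]; norm_num)]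
  rw [inner_loop _ _ _ _ (by norm_num) (by rw [inner_fold_len (x := "8") (i := 0 + 1 + 1), inner_fold_len (x := "7.5") (i := 0 + 1), inner_fold_len (x := "7") (i := 0)]; norm_num)]
  rw [inner_loop _ _ _ _ (by norm_num) (by rw [inner_fold_len (x := "7.5") (i := 0 + 1), inner_fold_len (x := "7") (i := 0)]; norm_num)]
  rw [inner_loop _ _ _ _ (by norm_num) (by rw [inner_fold_len (x := "7") (i := 0)]; norm_num)]
  rw [inner_loop _ _ _ _ (by norm_num) (by norm_num)]
  simp [List.set]

-- invariant of the run-length fold over a sorted tail l with current run (h, k)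
theorem fold_run (l : List String) (runs : PySem.Dict String Int) (h : String) (k : Int)
    (hle : ∀ y ∈ l, h ≤ y) (hpw : l.Pairwise (· ≤ ·)) (s : String) :
    (pvFlush (l.foldl pvStep (runs, some h, k))).getD s 0
      = if s = h then k + (l.count s : Int)
        else if s ∈ l then (l.count s : Int)
        else runs.getD s 0 := by
  induction l generalizing runs h k with
  | nil =>
      simp only [List.foldl_nil, pvFlush, PySem.Dict.getD_insert, List.count_nil,
        List.not_mem_nil, if_false]
      split_ifs <;> simp
  | cons y t ih =>
      have hyt : ∀ z ∈ t, y ≤ z := (List.pairwise_cons.mp hpw).1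
      have hpt : t.Pairwise (· ≤ ·) := (List.pairwise_cons.mp hpw).2
      simp only [List.foldl_cons, pvStep]
      by_cases hyh : (y == h) = true
      · have hy : y = h := eq_of_beq hyh
        rw [if_pos hyh, ih runs h (k + 1) (fun z hz => hle z (List.mem_cons_of_mem _ hz)) hpt]
        by_cases hsh : s = h
        · rw [if_pos hsh, if_pos hsh]
          have : (y :: t).count s = t.count s + 1 := by simp [hy, hsh]
          rw [this]; push_cast; ring
        · rw [if_neg hsh, if_neg hsh]
          have hsy : s ≠ y := fun hh => hsh (hh.trans hy)
          have hmem : (s ∈ y :: t) ↔ s ∈ t := by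
            simp [List.mem_cons]; intro hh; exact absurd hh hsy
          have hcnt : (y :: t).count s = t.count s := by
            rw [List.count_cons, if_neg (by simpa using fun hh => hsy hh.symm)]; simp
          rw [hcnt]
          by_cases hst : s ∈ t
          · rw [if_pos hst, if_pos (hmem.mpr hst)]
          · rw [if_neg hst, if_neg (fun hh => hst (hmem.mp hh))]
      · have hyh' : y ≠ h := fun hh => hyh (by simp [hh])
        have hhy : h < y := lt_of_le_of_ne (hle y List.mem_cons_self) (fun hh => hyh' hh.symm)
        rw [if_neg hyh, ih (runs.insert h k) y 1 hyt hpt]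
        by_cases hsh : s = h
        · -- h is strictly below the whole tail, so it never reappears
          have hnot : s ∉ y :: t := by
            rw [hsh]; intro hmem
            rcases List.mem_cons.mp hmem with hh | hh
            · exact hyh' hh.symm
            · exact absurd (hyt h hh) (not_le.mpr hhy)
          have hns : s ≠ y := fun hh => hnot (hh ▸ List.mem_cons_self)
          have hnt : s ∉ t := fun hh => hnot (List.mem_cons_of_mem _ hh)
          rw [if_pos hsh, if_neg hns, if_neg hnt, PySem.Dict.getD_insert, if_pos hsh,
            List.count_eq_zero.mpr hnot]
          simp
        · rw [if_neg hsh]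
          by_cases hsy : s = y
          · rw [if_pos hsy, if_pos (hsy ▸ List.mem_cons_self)]
            have : (y :: t).count s = t.count s + 1 := by simp [hsy]
            rw [this]; push_cast; ring
          · rw [if_neg hsy]
            have hmem : (s ∈ y :: t) ↔ s ∈ t := by
              simp [List.mem_cons]; intro hh; exact absurd hh hsy
            have hcnt : (y :: t).count s = t.count s := by
              rw [List.count_cons, if_neg (by simpa using fun hh => hsy hh.symm)]; simp
            by_cases hst : s ∈ t
            · rw [if_pos hst, if_pos (hmem.mpr hst), hcnt]
            · rw [if_neg hst, if_neg (fun hh => hst (hmem.mp hh)),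
                PySem.Dict.getD_insert, if_neg hsh]

-- run-length table of a ≤-sorted list gives the multiplicity of every value
theorem pvRuns_getD (l : List String) (hs : l.Pairwise (· ≤ ·)) (s : String) :
    (pvFlush (l.foldl pvStep (PySem.Dict.empty, none, 0))).getD s 0 = (l.count s : Int) := by
  cases l with
  | nil => simp [pvFlush, PySem.Dict.getD_empty]
  | cons x t =>
      simp only [List.foldl_cons, pvStep]
      rw [fold_run t PySem.Dict.empty x 1 (List.pairwise_cons.mp hs).1
        (List.pairwise_cons.mp hs).2 s]
      by_cases hsx : s = x
      · rw [if_pos hsx]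
        have : (x :: t).count s = t.count s + 1 := by simp [hsx]
        rw [this]; push_cast; ring
      · rw [if_neg hsx]
        have hcnt : (x :: t).count s = t.count s := by
          rw [List.count_cons, if_neg (by simpa using fun hh => hsx hh.symm)]; simp
        by_cases hst : s ∈ t
        · rw [if_pos hst, hcnt]
        · rw [if_neg hst, PySem.Dict.getD_empty, hcnt, List.count_eq_zero.mpr hst]
          simp

theorem solution_alt_eq_counts (shoes_size : List String) :
    solution_alt shoes_size =
      [ (List.count "7" shoes_size : Int), (List.count "7.5" shoes_size : Int),
        (List.count "8" shoes_size : Int), (List.count "8.5" shoes_size : Int),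
        (List.count "9" shoes_size : Int), (List.count "9.5" shoes_size : Int) ] := by
  unfold solution_alt
  have hperm := PySem.List.sorted_perm shoes_size (fun x => x) false
  have hpw := PySem.List.sorted_pairwise shoes_size (fun x => x)
  simp only [List.map_cons, List.map_nil]
  rw [pvRuns_getD _ hpw, pvRuns_getD _ hpw, pvRuns_getD _ hpw, pvRuns_getD _ hpw,
    pvRuns_getD _ hpw, pvRuns_getD _ hpw]
  simp [hperm.count_eq]

-- ===== VERDICT =====
theorem solution_spec : Claim_equal_solution := by
  intro shoes_size _
  unfold Spec_solution
  rw [solution_eq_counts, solution_alt_eq_counts]
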